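-- pv_equiv track=rewrite | github.com/calvinp0/chemprop_dmat | heuristics/utils.py | check_atom_d_constraints
-- ===== SOURCE A (Python) =====
-- from typing import Optional, Tuple, Union, List, Dict, Any, Set, Iterable
--
-- class ZMatError(Exception):
--     pass
--
-- def check_atom_d_constraints(atom_index: int,
--                              constraints: Dict[str, List[Tuple[int, ...]]],
--                              ) -> Tuple[Optional[Tuple[int, int, int, int]], Optional[str]]:
--     if not any(k.startswith("D_") for k in constraints.keys()):
--         return None, None
--
--     d_constraints = {k: v for k, v in constraints.items() if k.startswith("D_")}
--
--     for d_list in d_constraints.values():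
--         if any(len(tpl) != 4 for tpl in d_list):
--             raise ZMatError(f'"D" constraints must contain only tuples of length four, got: {d_constraints}.')
--
--     if any(k not in ("D_atom", "D_group") for k in d_constraints.keys()):
--         raise ZMatError(f'"D" constraints must be either "D_atom" or "D_group", got: {d_constraints}.')
--
--     occurrences = 0
--     for d_list in d_constraints.values():
--         occurrences += sum(tpl[0] == atom_index for tpl in d_list)
--
--     if occurrences == 0:
--         return None, None
--     if occurrences > 1:
--         raise ZMatError(
--             f'A single atom cannot be constrained more than once. '
--             f'Atom {atom_index} is constrained {occurrences} times in "D" constraints.'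
--         )
--
--     for constraint_type, d_list in d_constraints.items():
--         for tpl in d_list:
--             if tpl[0] == atom_index:
--                 return (tpl[0], tpl[1], tpl[2], tpl[3]), constraint_type
--
--     return None, None
-- ===== SOURCE B (Python) =====
-- from typing import Optional, Tuple, List, Dict
--
--
-- class ZMatError(Exception):
--     pass
--
--
-- def check_atom_d_constraints(atom_index: int,
--                              constraints: Dict[str, List[Tuple[int, ...]]],
--                              ) -> Tuple[Optional[Tuple[int, int, int, int]], Optional[str]]:
--     # Single fused pass with an accumulator: no d_constraints dict is built and there are no
--     # staged validation / counting / lookup passes; each D_ item is validated and scanned once.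
--     count = 0
--     found = None
--     for key, d_list in constraints.items():
--         if not key.startswith("D_"):
--             continue
--         if key not in ("D_atom", "D_group"):
--             raise ZMatError(f'"D" constraints must be either "D_atom" or "D_group", got: {key}.')
--         for tpl in d_list:
--             if len(tpl) != 4:
--                 raise ZMatError(f'"D" constraints must contain only tuples of length four, got: {tpl}.')
--             if tpl[0] == atom_index:
--                 count += 1
--                 if found is None:
--                     found = ((tpl[0], tpl[1], tpl[2], tpl[3]), key)
--     if count > 1:
--         raise ZMatError(
--             f'A single atom cannot be constrained more than once. '
--             f'Atom {atom_index} is constrained {count} times in "D" constraints.'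
--         )
--     return found if found is not None else (None, None)
-- ===== Notes on version B (the rewrite author's own statement) =====
-- stated objective: alternative
-- what changed: A builds a filtered d_constraints dict and runs four staged passes (tuple-length scan, key-validation scan, occurrence-count pass, first-match re-scan); B makes one fused pass over the original dict with a (count, first-match) accumulator, validating and scanning each D_ item exactly once and never materialising d_constraints.
import Mathlib
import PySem

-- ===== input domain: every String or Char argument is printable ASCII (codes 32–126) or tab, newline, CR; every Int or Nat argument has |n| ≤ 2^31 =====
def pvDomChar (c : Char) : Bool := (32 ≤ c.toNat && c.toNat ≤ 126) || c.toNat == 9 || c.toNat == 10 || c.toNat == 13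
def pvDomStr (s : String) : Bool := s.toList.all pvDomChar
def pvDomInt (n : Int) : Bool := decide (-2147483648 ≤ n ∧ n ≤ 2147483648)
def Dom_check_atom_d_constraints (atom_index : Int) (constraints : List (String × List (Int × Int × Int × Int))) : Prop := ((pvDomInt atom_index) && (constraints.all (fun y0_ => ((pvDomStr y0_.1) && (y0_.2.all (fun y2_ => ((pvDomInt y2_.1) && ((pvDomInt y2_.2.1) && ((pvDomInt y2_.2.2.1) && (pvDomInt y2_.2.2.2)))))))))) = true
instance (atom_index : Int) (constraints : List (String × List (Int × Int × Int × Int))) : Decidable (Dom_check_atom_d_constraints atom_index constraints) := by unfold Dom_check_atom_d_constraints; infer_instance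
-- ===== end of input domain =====

-- B replaces A's staged passes (filter, two validation scans, count pass, first-match re-scan) by one fused pass with a (count, first-match) accumulator.


-- ===== PORT A =====
-- A's final nested loop: first tuple with tpl[0] == atom_index across the D_ items, in order.
def pvAScanInner (atom_index : Int) (k : String) : List (Int × Int × Int × Int) → Option ((Option (Int × Int × Int × Int)) × Option String)
  | [] => none
  | tpl :: rest =>
      if tpl.1 == atom_index then some (some (tpl.1, tpl.2.1, tpl.2.2.1, tpl.2.2.2), some k)
      else pvAScanInner atom_index k rest

def pvAScan (atom_index : Int) : List (String × List (Int × Int × Int × Int)) → (Option (Int × Int × Int × Int)) × Option String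
  | [] => (none, none)
  | (k, d_list) :: rest =>
      match pvAScanInner atom_index k d_list with
      | some r => r
      | none => pvAScan atom_index rest

def check_atom_d_constraints (atom_index : Int) (constraints : List (String × List (Int × Int × Int × Int))) : (Option (Int × Int × Int × Int)) × Option String :=
  if ¬ constraints.any (fun kv => PySem.Str.startswith kv.1 "D_") then (none, none)
  else
    let d_constraints := constraints.filter (fun kv => PySem.Str.startswith kv.1 "D_")
    -- Python's length-four check: under this Lean type every tuple has length four, so the raise is unreachable
    if d_constraints.any (fun kv => !(kv.1 == "D_atom" || kv.1 == "D_group")) then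
      (none, none)  -- raise ZMatError: excluded by Pre_
    else
      let occurrences : Nat := d_constraints.foldl (fun acc kv => acc + kv.2.countP (fun tpl => tpl.1 == atom_index)) 0
      if occurrences == 0 then (none, none)
      else if 1 < occurrences then (none, none)  -- raise ZMatError: excluded by Pre_
      else pvAScan atom_index d_constraints

-- ===== PORT B =====
-- B's inner loop over one d_list: bump the count and record the first match (length-4 check is
-- vacuous under this Lean type, as in A's port).
def pvBInner (atom_index : Int) (k : String) (dl : List (Int × Int × Int × Int))
    (st : Nat × Option ((Int × Int × Int × Int) × String)) : Nat × Option ((Int × Int × Int × Int) × String) :=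
  dl.foldl (fun st tpl =>
    if tpl.1 == atom_index then
      (st.1 + 1, match st.2 with
                 | none => some ((tpl.1, tpl.2.1, tpl.2.2.1, tpl.2.2.2), k)
                 | some f => some f)
    else st) st

-- B's single fused pass; 'none' = the mid-loop ZMatError on a bad "D_" key (excluded by Pre_).
def pvBLoop (atom_index : Int) : List (String × List (Int × Int × Int × Int)) →
    (Nat × Option ((Int × Int × Int × Int) × String)) → Option (Nat × Option ((Int × Int × Int × Int) × String))
  | [], st => some st
  | (k, dl) :: rest, st =>
      if ¬ PySem.Str.startswith k "D_" then pvBLoop atom_index rest st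
      else if ¬ (k == "D_atom" || k == "D_group") then none  -- raise ZMatError: excluded by Pre_
      else pvBLoop atom_index rest (pvBInner atom_index k dl st)

def check_atom_d_constraints_alt (atom_index : Int) (constraints : List (String × List (Int × Int × Int × Int))) : (Option (Int × Int × Int × Int)) × Option String :=
  match pvBLoop atom_index constraints (0, none) with
  | none => (none, none)  -- raise ZMatError: excluded by Pre_
  | some (count, found) =>
      if 1 < count then (none, none)  -- raise ZMatError: excluded by Pre_
      else match found with
           | none => (none, none)
           | some (t, k) => (some t, some k)

-- ===== PRECONDITION & SPEC =====
-- Pre_ excludes exactly the inputs on which the Python raises ZMatError: a "D_"-prefixed key other than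
-- "D_atom"/"D_group", or more than one constraint tuple whose first entry equals atom_index.
def Pre_check_atom_d_constraints (atom_index : Int) (constraints : List (String × List (Int × Int × Int × Int))) : Prop :=
  (∀ kv ∈ constraints, PySem.Str.startswith kv.1 "D_" → kv.1 = "D_atom" ∨ kv.1 = "D_group") ∧
  (constraints.flatMap (fun kv => if PySem.Str.startswith kv.1 "D_" then kv.2 else [])).countP
    (fun tpl => tpl.1 == atom_index) ≤ 1
instance (atom_index : Int) (constraints : List (String × List (Int × Int × Int × Int))) : Decidable (Pre_check_atom_d_constraints atom_index constraints) := by unfold Pre_check_atom_d_constraints; infer_instance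

def pvWitness_check_atom_d_constraints : Int × (List (String × List (Int × Int × Int × Int))) :=
  (2, [("D_atom", [(2, 0, 1, 3)]), ("D_group", [(5, 1, 2, 3)]), ("other", [])])

def Spec_check_atom_d_constraints (atom_index : Int) (constraints : List (String × List (Int × Int × Int × Int))) (out : (Option (Int × Int × Int × Int)) × Option String) : Prop := out = check_atom_d_constraints_alt atom_index constraints
instance (atom_index : Int) (constraints : List (String × List (Int × Int × Int × Int))) (out : (Option (Int × Int × Int × Int)) × Option String) : Decidable (Spec_check_atom_d_constraints atom_index constraints out) := by unfold Spec_check_atom_d_constraints; infer_instance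

-- ===== CLAIM (what is proved, stated in full; the proofs are below) =====
def Claim_equal_check_atom_d_constraints : Prop := ∀ (atom_index : Int) (constraints : List (String × List (Int × Int × Int × Int))), Dom_check_atom_d_constraints atom_index constraints → Pre_check_atom_d_constraints atom_index constraints → Spec_check_atom_d_constraints atom_index constraints (check_atom_d_constraints atom_index constraints)

-- ===== LEMMAS AND PROOFS =====

-- the ordered list of matches across the D_ items (a specification device shared by both analyses)
def pvMatches (atom_index : Int) (d : List (String × List (Int × Int × Int × Int))) : List (String × (Int × Int × Int × Int)) :=
  d.flatMap (fun kv => (kv.2.filter (fun tpl => tpl.1 == atom_index)).map (fun tpl => (kv.1, tpl)))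

theorem pvOcc_eq_matches_length (atom_index : Int) (d : List (String × List (Int × Int × Int × Int))) (n : Nat) :
    d.foldl (fun acc kv => acc + kv.2.countP (fun tpl => tpl.1 == atom_index)) n
      = n + (pvMatches atom_index d).length := by
  induction d generalizing n with
  | nil => simp [pvMatches]
  | cons kv rest ih =>
      simp only [pvMatches, List.foldl_cons, List.flatMap_cons, List.length_append,
        List.length_map, List.countP_eq_length_filter] at ih ⊢
      rw [ih]; omega

theorem pvAScanInner_eq (atom_index : Int) (k : String) (l : List (Int × Int × Int × Int)) :
    pvAScanInner atom_index k l
      = (l.filter (fun tpl => tpl.1 == atom_index)).head?.map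
          (fun tpl => (some (tpl.1, tpl.2.1, tpl.2.2.1, tpl.2.2.2), some k)) := by
  induction l with
  | nil => simp [pvAScanInner]
  | cons tpl rest ih =>
      by_cases h : tpl.1 == atom_index
      · simp [pvAScanInner, h]
      · simp [pvAScanInner, h, ih]

theorem pvAScan_eq (atom_index : Int) (d : List (String × List (Int × Int × Int × Int))) :
    pvAScan atom_index d
      = match pvMatches atom_index d with
        | [] => (none, none)
        | (k, tpl) :: _ => (some (tpl.1, tpl.2.1, tpl.2.2.1, tpl.2.2.2), some k) := by
  induction d with
  | nil => simp [pvAScan, pvMatches]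
  | cons kv rest ih =>
      obtain ⟨k, d_list⟩ := kv
      rw [pvAScan, pvAScanInner_eq]
      cases hf : d_list.filter (fun tpl => tpl.1 == atom_index) with
      | nil => simp only [pvMatches, List.flatMap_cons, hf, List.map_nil, List.nil_append,
                 Option.map, List.head?_nil] ; exact ih
      | cons t ts => simp [pvMatches, hf]

theorem pvBInner_eq (atom_index : Int) (k : String) (l : List (Int × Int × Int × Int))
    (c : Nat) (f : Option ((Int × Int × Int × Int) × String)) :
    pvBInner atom_index k l (c, f)
      = (c + (l.filter (fun tpl => tpl.1 == atom_index)).length,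
         f.or ((l.filter (fun tpl => tpl.1 == atom_index)).head?.map (fun tpl => (tpl, k)))) := by
  induction l generalizing c f with
  | nil => simp [pvBInner]
  | cons tpl rest ih =>
      by_cases h : (tpl.1 == atom_index) = true
      · have hstep : pvBInner atom_index k (tpl :: rest) (c, f)
            = pvBInner atom_index k rest
                (c + 1, match f with
                        | none => some ((tpl.1, tpl.2.1, tpl.2.2.1, tpl.2.2.2), k)
                        | some v => some v) := by
          simp only [pvBInner, List.foldl_cons, h, if_true]
        have heta : ((tpl.1, tpl.2.1, tpl.2.2.1, tpl.2.2.2) : Int × Int × Int × Int) = tpl := rfl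
        rw [hstep]
        simp only [List.filter_cons, h, if_true]
        cases f with
        | none =>
            rw [ih, heta]
            simp only [List.length_cons, List.head?_cons, Option.map_some, Option.none_or,
              Option.some_or]
            simp only [Prod.mk.injEq, and_true]
            omega
        | some v =>
            rw [ih]
            simp only [List.length_cons, List.head?_cons, Option.map_some, Option.some_or]
            simp only [Prod.mk.injEq, and_true]
            omega
      · have hstep : pvBInner atom_index k (tpl :: rest) (c, f)
            = pvBInner atom_index k rest (c, f) := by
          simp only [pvBInner, List.foldl_cons, h, if_false, Bool.false_eq_true]
        rw [hstep, ih]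
        simp only [List.filter_cons, h, if_false, Bool.false_eq_true]

theorem pvMatches_cons (atom_index : Int) (k : String) (dl : List (Int × Int × Int × Int))
    (d : List (String × List (Int × Int × Int × Int))) :
    pvMatches atom_index ((k, dl) :: d)
      = (dl.filter (fun tpl => tpl.1 == atom_index)).map (fun tpl => (k, tpl)) ++ pvMatches atom_index d := rfl

theorem pvBLoop_good (atom_index : Int) (items : List (String × List (Int × Int × Int × Int)))
    (hgood : ∀ kv ∈ items, PySem.Str.startswith kv.1 "D_" → kv.1 = "D_atom" ∨ kv.1 = "D_group")
    (c : Nat) (f : Option ((Int × Int × Int × Int) × String)) :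
    pvBLoop atom_index items (c, f)
      = some (c + (pvMatches atom_index (items.filter (fun kv => PySem.Str.startswith kv.1 "D_"))).length,
              f.or ((pvMatches atom_index (items.filter (fun kv => PySem.Str.startswith kv.1 "D_"))).head?.map
                (fun m => (m.2, m.1)))) := by
  induction items generalizing c f with
  | nil => simp [pvBLoop, pvMatches]
  | cons kv rest ih =>
      obtain ⟨k, dl⟩ := kv
      by_cases hsw : PySem.Str.startswith k "D_" = true
      · have hk : k = "D_atom" ∨ k = "D_group" := hgood (k, dl) (by simp) hsw
        have hkb : (k == "D_atom" || k == "D_group") = true := by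
          rcases hk with h | h <;> simp [h]
        rw [pvBLoop, if_neg (not_not_intro hsw), if_neg (not_not_intro hkb), pvBInner_eq,
          ih (fun kv hm => hgood kv (List.mem_cons_of_mem _ hm))]
        simp only [List.filter_cons, hsw, if_true, pvMatches_cons]
        simp only [Option.some.injEq, Prod.mk.injEq, List.length_append, List.length_map,
          List.head?_append, List.head?_map, Option.map_or, Option.map_map, Option.or_assoc]
        constructor
        · omega
        · rfl
      · rw [pvBLoop, if_pos hsw,
          ih (fun kv hm => hgood kv (List.mem_cons_of_mem _ hm)),
          List.filter_cons_of_neg (by simpa using hsw)]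

-- ===== VERDICT (by name: the statement is the Claim_ definition above) =====
theorem check_atom_d_constraints_spec : Claim_equal_check_atom_d_constraints := by
  intro atom_index constraints _hDom hPre
  -- Pre_'s first conjunct rules out the bad-key raise; the count bound is needed only for
  -- faithfulness to the Python (which raises ZMatError outside Pre_), not by this proof.
  unfold Spec_check_atom_d_constraints check_atom_d_constraints check_atom_d_constraints_alt
  have hgood : ∀ kv ∈ constraints, PySem.Str.startswith kv.1 "D_" → kv.1 = "D_atom" ∨ kv.1 = "D_group" := hPre.1
  rw [pvBLoop_good atom_index constraints hgood]
  set d := constraints.filter (fun kv => PySem.Str.startswith kv.1 "D_") with hd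
  set M := pvMatches atom_index d with hM
  by_cases h1 : (constraints.any fun kv => PySem.Str.startswith kv.1 "D_") = true
  · rw [if_neg (not_not_intro h1)]
    simp only []
    have h2 : (d.any fun kv => !(kv.1 == "D_atom" || kv.1 == "D_group")) = false := by
      rw [List.any_eq_false]
      intro kv hkv
      have hmem := List.mem_filter.mp hkv
      rcases hgood kv hmem.1 hmem.2 with h | h <;> simp [h]
    rw [if_neg (by rw [h2]; exact Bool.false_ne_true)]
    rw [pvOcc_eq_matches_length]
    simp only [Nat.zero_add, ← hM]
    cases hMc : M with
    | nil => simp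
    | cons m ms =>
        cases hms : ms with
        | nil =>
            obtain ⟨mk, mt⟩ := m
            simp only [List.length_cons, List.length_nil, List.head?_cons, Option.none_or,
              Option.map_some]
            rw [pvAScan_eq, ← hM, hMc, hms]
            norm_num
        | cons m2 ms2 => simp
  · rw [if_pos h1]
    have hany : (constraints.any fun kv => PySem.Str.startswith kv.1 "D_") = false :=
      Bool.eq_false_iff.mpr h1
    have hdnil : d = [] := by
      rw [hd, List.filter_eq_nil_iff]
      intro kv hkv
      simpa using List.any_eq_false.mp hany kv hkv
    have hMnil : M = [] := by rw [hM, hdnil]; rfl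
    rw [hMnil]
    simp
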